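-- pv_equiv track=rewrite | github.com/kristogj/general-purpose-mcts | environment/game.py | get_legal_actions
-- ===== SOURCE A (Python) =====
-- def get_legal_actions(state):
--     """
--     Given a state, return all legal actions from that state.
--     A player can make two kind of moves:
--         a) (P)ick up the coin at index 0 (the ledge)
--             "P" means pick up the coin at the ledge, leaving it an empty cell.
--         b) (M)ove a coin to the left between its current position and its left-nearest-neighbour
--             "M-X-Y" where X and Y are two integers, means that you should move coin on index X to index Y.
--     :param state: int - How many stones are left on the board
--     :return: list[int]
--     """
--     legal_actions = []
--     if state[0] > 0:
--         legal_actions.append("P")  # Add the pick-up move if a coin is at the ledge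
--
--     for i in reversed(range(len(state))):
--         if state[i] > 0:
--             j = i - 1
--             while state[j] == 0 and j >= 0:
--                 legal_actions.append("M-{}-{}".format(i, j))
--                 j -= 1
--     return legal_actions
-- ===== SOURCE B (Python) =====
-- def get_legal_actions(state):
--     legal_actions = []
--     if state[0] > 0:
--         legal_actions.append("P")  # pick-up move, and preserves IndexError on []
--     # One forward pass: maintain the current contiguous run of zero cells;
--     # on a coin, snapshot its block of moves (descending j); any nonzero cell resets the run.
--     blocks = []
--     run = []
--     for i, v in enumerate(state):
--         if v > 0:
--             blocks.append(["M-{}-{}".format(i, j) for j in reversed(run)])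
--             run = []
--         elif v == 0:
--             run.append(i)
--         else:
--             run = []
--     for block in reversed(blocks):
--         legal_actions.extend(block)
--     return legal_actions
-- ===== Notes on version B (the rewrite author's own statement) =====
-- stated objective: alternative
-- what changed: Replaces A's reversed outer index loop with a per-coin backward while-scan by a single forward pass that maintains the current contiguous zero-run and snapshots one move block per coin, emitting the collected blocks in reverse at the end; Pre_ excludes only the empty list, on which both raise IndexError.
-- outside the precondition, e.g. on get_legal_actions([]): A raises IndexError, B raises IndexError
import Mathlib
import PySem

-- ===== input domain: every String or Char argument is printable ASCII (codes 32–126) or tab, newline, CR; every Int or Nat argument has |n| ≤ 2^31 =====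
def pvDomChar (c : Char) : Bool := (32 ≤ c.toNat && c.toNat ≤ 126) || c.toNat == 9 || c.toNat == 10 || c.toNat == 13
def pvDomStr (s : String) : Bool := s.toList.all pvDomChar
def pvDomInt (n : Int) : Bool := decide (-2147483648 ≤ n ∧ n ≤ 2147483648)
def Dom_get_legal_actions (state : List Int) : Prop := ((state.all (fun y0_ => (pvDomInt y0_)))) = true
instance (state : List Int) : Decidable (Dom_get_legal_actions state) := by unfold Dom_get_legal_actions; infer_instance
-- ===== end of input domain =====

-- B restructures A: one forward pass maintaining the current zero-run, snapshotting a move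
-- block per coin, then emitting the blocks in reverse; same cost, different decomposition.

-- "M-{}-{}".format(i, j)
def pvMstr (i j : Int) : String := "M-" ++ PySem.Int.toStr i ++ "-" ++ PySem.Int.toStr j

-- ===== PORT A =====
-- inner 'while state[j] == 0 and j >= 0: append; j -= 1'
def pvWhileA (state : List Int) (i : Int) (j : Int) (la : List String) : List String :=
  if h : PySem.List.pyGet? state j = some 0 ∧ 0 ≤ j then
    pvWhileA state i (j - 1) (la ++ [pvMstr i j])
  else la
termination_by (j + 1).toNat
decreasing_by omega

def get_legal_actions (state : List Int) : List String :=
  match PySem.List.pyGet? state 0 with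
  | none => []   -- Python raises IndexError here; excluded by Pre_
  | some v =>
    let la0 := if v > 0 then ["P"] else []
    (PySem.List.pyRange 0 state.length 1).reverse.foldl
      (fun la i =>
        if PySem.List.pyGetD state i 0 > 0 then pvWhileA state i (i - 1) la else la) la0

-- ===== PORT B =====
-- one step of B's forward pass: accumulator (blocks, run), cell (i, v)
def pvStepB (acc : List (List String) × List Int) (p : Int × Int) :
    List (List String) × List Int :=
  if p.2 > 0 then (acc.1 ++ [acc.2.reverse.map (fun j => pvMstr p.1 j)], [])
  else if p.2 = 0 then (acc.1, acc.2 ++ [p.1])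
  else (acc.1, [])

def get_legal_actions_alt (state : List Int) : List String :=
  match PySem.List.pyGet? state 0 with
  | none => []   -- Python raises IndexError here; excluded by Pre_
  | some v =>
    let la0 := if v > 0 then ["P"] else []
    let blocks := ((PySem.List.enumerate state 0).foldl pvStepB ([], [])).1
    blocks.reverse.foldl (fun acc b => acc ++ b) la0

-- ===== PRECONDITION & SPEC =====
-- Pre_ excludes only the empty list, on which A (and B) raise IndexError at the initial ledge subscript.
def Pre_get_legal_actions (state : List Int) : Prop := state ≠ []
instance (state : List Int) : Decidable (Pre_get_legal_actions state) := by
  unfold Pre_get_legal_actions; infer_instance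

def pvWitness_get_legal_actions : List Int := [1, 0, 2]

def Spec_get_legal_actions (state : List Int) (out : List String) : Prop :=
  out = get_legal_actions_alt state
instance (state : List Int) (out : List String) : Decidable (Spec_get_legal_actions state out) := by
  unfold Spec_get_legal_actions; infer_instance

-- ===== CLAIM (what is proved, stated in full; the proofs are below) =====
def Claim_equal_get_legal_actions : Prop :=
  ∀ (state : List Int), Dom_get_legal_actions state → Pre_get_legal_actions state →
    Spec_get_legal_actions state (get_legal_actions state)

-- ===== LEMMAS AND PROOFS =====

-- descending indices of the maximal zero run just below index k
def pvRunD (state : List Int) : Nat → List Int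
  | 0 => []
  | k+1 => if state.getD k 1 = 0 then (k : Int) :: pvRunD state k else []

-- the moves contributed by index k (a block if it holds a coin)
def pvBlkF (state : List Int) (k : Nat) : List String :=
  if state.getD k 0 > 0 then (pvRunD state k).map (fun j => pvMstr (k : Int) j) else []

-- B's pass, as a recursive spec over (index, value) pairs
def pvProcB : List (Int × Int) → List Int → List (List String)
  | [], _ => []
  | (i, v) :: rest, run =>
    if v > 0 then (run.reverse.map (fun j => pvMstr i j)) :: pvProcB rest []
    else if v = 0 then pvProcB rest (run ++ [i])
    else pvProcB rest []

-- ascending block list for indices k, k+1, …, k+rem-1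
def pvAscB (state : List Int) : Nat → Nat → List (List String)
  | 0, _ => []
  | r+1, k =>
    (if state.getD k 0 > 0 then [(pvRunD state k).map (fun j => pvMstr (k : Int) j)] else [])
      ++ pvAscB state r (k+1)

-- A's outer loop, as a recursive spec over the descending Nat index list
def pvProcA (state : List Int) : List Nat → List String
  | [] => []
  | k :: rest => pvBlkF state k ++ pvProcA state rest

theorem pvWhileA_eq (state : List Int) (i : Int) :
    ∀ (k : Nat), k ≤ state.length → ∀ la,
      pvWhileA state i ((k : Int) - 1) la = la ++ (pvRunD state k).map (fun j => pvMstr i j) := by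
  intro k
  induction k with
  | zero =>
    intro _ la
    rw [pvWhileA]
    have hno : ¬ (PySem.List.pyGet? state (((0:Nat) : Int) - 1) = some 0 ∧ 0 ≤ ((0:Nat) : Int) - 1) := by
      rintro ⟨_, h2⟩; omega
    rw [dif_neg hno]
    simp [pvRunD]
  | succ k ih =>
    intro hk la
    have hk' : k < state.length := by omega
    have hcast : (((k+1 : Nat)) : Int) - 1 = (k : Int) := by push_cast; ring
    rw [hcast, pvWhileA]
    have hget : PySem.List.pyGet? state (k : Int) = some state[k] := by
      rw [PySem.List.pyGet?_natCast]
      simp [hk']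
    have hgetD : state.getD k 1 = state[k] := List.getD_eq_getElem state 1 hk'
    by_cases hz : state[k] = 0
    · have hcond : PySem.List.pyGet? state (k : Int) = some 0 ∧ 0 ≤ (k : Int) := by
        exact ⟨by rw [hget, hz], by positivity⟩
      rw [dif_pos hcond, ih (by omega)]
      simp [pvRunD, List.getElem?_eq_getElem hk', hz, List.append_assoc]
    · have hcond : ¬ (PySem.List.pyGet? state (k : Int) = some 0 ∧ 0 ≤ (k : Int)) := by
        rintro ⟨h1, _⟩; rw [hget] at h1; exact hz (Option.some.injEq _ _ ▸ h1)
      rw [dif_neg hcond]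
      simp [pvRunD, List.getElem?_eq_getElem hk', hz]

theorem pvA_outer (state : List Int) :
    ∀ (l : List Nat), (∀ k ∈ l, k < state.length) → ∀ la,
      (l.map (Nat.cast : Nat → Int)).foldl
        (fun la i =>
          if PySem.List.pyGetD state i 0 > 0 then pvWhileA state i (i - 1) la else la) la
      = la ++ pvProcA state l := by
  intro l
  induction l with
  | nil => intro _ la; simp [pvProcA]
  | cons k rest ih =>
    intro hmem la
    have hk : k < state.length := hmem k (List.mem_cons_self ..)
    have hD : PySem.List.pyGetD state (k : Int) 0 = state.getD k 0 := by
      simp [PySem.List.pyGetD_natCast]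
    rw [List.map_cons, List.foldl_cons]
    by_cases hc : state.getD k 0 > 0
    · rw [if_pos (by rw [hD]; exact hc), pvWhileA_eq state (k : Int) k (by omega),
        ih (fun x hx => hmem x (List.mem_cons_of_mem _ hx))]
      simp only [pvProcA, pvBlkF]
      rw [if_pos hc, List.append_assoc]
    · rw [if_neg (by rw [hD]; exact hc), ih (fun x hx => hmem x (List.mem_cons_of_mem _ hx))]
      simp only [pvProcA, pvBlkF]
      rw [if_neg hc]
      simp

theorem pvB_fold :
    ∀ (l : List (Int × Int)) (acc : List (List String) × List Int),
      (l.foldl pvStepB acc).1 = acc.1 ++ pvProcB l acc.2 := by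
  intro l
  induction l with
  | nil => intro acc; simp [pvProcB]
  | cons p rest ih =>
    intro acc
    obtain ⟨i, v⟩ := p
    simp only [List.foldl_cons]
    by_cases h1 : v > 0
    · rw [ih]
      simp [pvStepB, pvProcB, h1, List.append_assoc]
    · by_cases h2 : v = 0
      · rw [ih]; simp [pvStepB, pvProcB, h2]
      · rw [ih]; simp [pvStepB, pvProcB, h1, h2]

theorem pvFoldlAppend :
    ∀ (l : List (List String)) (a : List String),
      l.foldl (fun acc b => acc ++ b) a = a ++ l.flatten := by
  intro l
  induction l with
  | nil => intro a; simp
  | cons b rest ih => intro a; simp [ih, List.append_assoc]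

theorem pvC1 (state : List Int) :
    ∀ (r k : Nat), k + r = state.length →
      pvProcB (PySem.List.enumerate (state.drop k) (k : Int)) ((pvRunD state k).reverse)
        = pvAscB state r k := by
  intro r
  induction r with
  | zero =>
    intro k hk
    rw [List.drop_eq_nil_of_le (by omega)]
    rfl
  | succ r ih =>
    intro k hk
    have hk' : k < state.length := by omega
    have hdrop : state.drop k = state[k] :: state.drop (k+1) :=
      (List.getElem_cons_drop hk').symm
    have hcast : (k : Int) + 1 = ((k+1 : Nat) : Int) := by push_cast; ring
    rw [hdrop, PySem.List.enumerate_cons, hcast]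
    have hgetD0 : state.getD k 0 = state[k] := List.getD_eq_getElem state 0 hk'
    have hih := ih (k+1) (by omega)
    by_cases h1 : state[k] > 0
    · have hrun : pvRunD state (k+1) = [] := by
        simp [pvRunD, List.getElem?_eq_getElem hk']
        omega
      rw [hrun] at hih
      simp only [List.reverse_nil] at hih
      simp only [pvProcB]
      rw [if_pos h1, List.reverse_reverse, hih]
      simp [pvAscB, List.getElem?_eq_getElem hk', h1]
    · by_cases h2 : state[k] = 0
      · have hrun : pvRunD state (k+1) = (k : Int) :: pvRunD state k := by
          simp [pvRunD, List.getElem?_eq_getElem hk', h2]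
        have hrev : (pvRunD state (k+1)).reverse = (pvRunD state k).reverse ++ [(k : Int)] := by
          rw [hrun]; simp
        simp only [pvProcB]
        rw [if_neg h1, if_pos h2, ← hrev, hih]
        simp [pvAscB, List.getElem?_eq_getElem hk', h2]
      · have hrun : pvRunD state (k+1) = [] := by
          simp [pvRunD, List.getElem?_eq_getElem hk', h2]
        rw [hrun] at hih
        simp only [List.reverse_nil] at hih
        simp only [pvProcB]
        rw [if_neg h1, if_neg h2, hih]
        simp [pvAscB, List.getElem?_eq_getElem hk', h1]

theorem pvC2 (state : List Int) :
    ∀ (r k : Nat),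
      (pvAscB state r k).reverse.flatten ++ pvProcA state (List.range k).reverse
        = pvProcA state (List.range (k + r)).reverse := by
  intro r
  induction r with
  | zero => intro k; simp [pvAscB]
  | succ r ih =>
    intro k
    have hr : List.range (k+1) = List.range k ++ [k] := List.range_succ
    have step : (pvAscB state (r+1) k).reverse.flatten
        = (pvAscB state r (k+1)).reverse.flatten ++ pvBlkF state k := by
      simp only [pvAscB, pvBlkF]
      by_cases hc : state.getD k 0 > 0
      · rw [if_pos hc, if_pos hc]; simp
      · rw [if_neg hc, if_neg hc]; simp
    rw [step, List.append_assoc]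
    have hproc : pvBlkF state k ++ pvProcA state (List.range k).reverse
        = pvProcA state (List.range (k+1)).reverse := by
      rw [hr]; simp [pvProcA]
    rw [hproc, ih (k+1), show k + 1 + r = k + (r+1) by omega]

-- ===== VERDICT (by name: the statement is the Claim_ definition above) =====
theorem get_legal_actions_spec : Claim_equal_get_legal_actions := by
  intro state _ hpre
  unfold Spec_get_legal_actions
  obtain ⟨x, xs, rfl⟩ : ∃ x xs, state = x :: xs := by
    cases state with
    | nil => exact absurd rfl hpre
    | cons x xs => exact ⟨x, xs, rfl⟩
  set st := x :: xs with hst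
  have hget0 : PySem.List.pyGet? st 0 = some x := PySem.List.pyGet?_zero_cons x xs
  unfold get_legal_actions get_legal_actions_alt
  rw [hget0]
  simp only []
  set la0 := if x > 0 then ["P"] else [] with hla0
  have hArange : (PySem.List.pyRange 0 st.length 1).reverse
      = ((List.range st.length).reverse).map (Nat.cast : Nat → Int) := by
    rw [PySem.List.pyRange_one]
    simp [List.map_reverse]
  rw [hArange, pvA_outer st ((List.range st.length).reverse)
    (fun k hk => List.mem_range.mp (List.mem_reverse.mp hk))]
  rw [pvB_fold, pvFoldlAppend]
  have hC1 := pvC1 st st.length 0 (by omega)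
  simp only [List.drop_zero, Nat.cast_zero, pvRunD, List.reverse_nil] at hC1
  rw [List.nil_append, hC1]
  have hC2 := pvC2 st st.length 0
  simp only [List.range_zero, List.reverse_nil, pvProcA, List.append_nil, Nat.zero_add] at hC2
  rw [hC2]
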